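-- pv_equiv track=rewrite | github.com/thiachan/agent | backend/scripts/enhance_demo_videos_comprehensive.py | extract_category_from_filename
-- ===== SOURCE A (Python) =====
-- from typing import List, Dict, Optional, Tuple
--
-- def extract_category_from_filename(filename: str) -> Tuple[str, List[str]]:
--     """Extract category and tags from filename"""
--     name_lower = filename.lower()
--     tags = []
--     category = ""
--
--     # Determine category
--     if 'dc' in name_lower and 'edge' in name_lower:
--         category = "DC Edge"
--         tags.extend(['DC Edge', 'Data Center Edge', 'Edge Security'])
--     elif 'cloud' in name_lower and 'edge' in name_lower:
--         category = "Cloud Edge"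
--         tags.extend(['Cloud Edge', 'Cloud Security', 'Edge Security'])
--     elif 'zone' in name_lower and 'seg' in name_lower:
--         category = "Zone Segmentation"
--         tags.extend(['Zone Segmentation', 'Segmentation', 'Network Segmentation'])
--     elif 'macro' in name_lower and 'micro' in name_lower:
--         category = "Macro/Micro Segmentation"
--         tags.extend(['Macro Segmentation', 'Micro Segmentation', 'Segmentation'])
--     elif 'smart' in name_lower and 'switch' in name_lower:
--         category = "Smart Switch"
--         tags.extend(['Smart Switch', 'L4 Switch', 'Switch'])
--     elif 'ai' in name_lower and 'model' in name_lower: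
--         category = "AI Model Protection"
--         tags.extend(['AI Model Protection', 'AI Security', 'Model Protection'])
--
--     # Extract product/feature tags
--     if 'snortml' in name_lower or 'snort' in name_lower:
--         tags.extend(['SnortML', 'Zero Day Threat Defense', 'Machine Learning'])
--     if 'eve' in name_lower:
--         tags.extend(['EVE', 'Encrypted Visibility Engine'])
--     if 'aiops' in name_lower:
--         tags.extend(['AIOps', 'Security Cloud Control', 'SCC'])
--     if 'rtc' in name_lower:
--         tags.extend(['RTC', 'Rapid Threat Containment'])
--     if 'sgt' in name_lower or 'tag' in name_lower:
--         tags.extend(['SGT', 'Security Group Tags', 'Tag-based Policy'])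
--     if 'hypershield' in name_lower:
--         tags.extend(['Hypershield', 'L4 Segmentation'])
--     if 'l4' in name_lower:
--         tags.extend(['L4 Switch', 'Layer 4'])
--     if 'mcd' in name_lower:
--         tags.extend(['MCD', 'Automated Cloud Security Orchestration'])
--
--     # Add demo video tag
--     tags.append('Demo Video')
--
--     # Remove duplicates while preserving order
--     seen = set()
--     unique_tags = []
--     for tag in tags:
--         if tag.lower() not in seen:
--             seen.add(tag.lower())
--             unique_tags.append(tag)
--
--     return category, unique_tags
-- ===== SOURCE B (Python) =====
-- # Decision-free rewrite: rule interactions (elif exclusivity and the lowercased dedup)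
-- # are compiled into mutually-exclusive flags and per-tag inclusion conditions, so the
-- # result is a single filter of a fixed candidate list -- no accumulation, no dedup pass.
-- def extract_category_from_filename(filename):
--     n = filename.lower()
--     dc = 'dc' in n and 'edge' in n
--     cloud = ('cloud' in n and 'edge' in n) and not dc
--     zone = ('zone' in n and 'seg' in n) and not (dc or cloud)
--     macro = ('macro' in n and 'micro' in n) and not (dc or cloud or zone)
--     smart = ('smart' in n and 'switch' in n) and not (dc or cloud or zone or macro)
--     ai = ('ai' in n and 'model' in n) and not (dc or cloud or zone or macro or smart)
--     snort = 'snortml' in n or 'snort' in n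
--     eve = 'eve' in n
--     aiops = 'aiops' in n
--     rtc = 'rtc' in n
--     sgt = 'sgt' in n or 'tag' in n
--     hyper = 'hypershield' in n
--     l4 = 'l4' in n
--     mcd = 'mcd' in n
--     category = next((c for f, c in [
--         (dc, "DC Edge"), (cloud, "Cloud Edge"), (zone, "Zone Segmentation"),
--         (macro, "Macro/Micro Segmentation"), (smart, "Smart Switch"),
--         (ai, "AI Model Protection")] if f), "")
--     candidates = [
--         (dc, 'DC Edge'), (dc, 'Data Center Edge'), (dc, 'Edge Security'),
--         (cloud, 'Cloud Edge'), (cloud, 'Cloud Security'), (cloud, 'Edge Security'),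
--         (zone, 'Zone Segmentation'), (zone, 'Segmentation'), (zone, 'Network Segmentation'),
--         (macro, 'Macro Segmentation'), (macro, 'Micro Segmentation'), (macro, 'Segmentation'),
--         (smart, 'Smart Switch'), (smart, 'L4 Switch'), (smart, 'Switch'),
--         (ai, 'AI Model Protection'), (ai, 'AI Security'), (ai, 'Model Protection'),
--         (snort, 'SnortML'), (snort, 'Zero Day Threat Defense'), (snort, 'Machine Learning'),
--         (eve, 'EVE'), (eve, 'Encrypted Visibility Engine'),
--         (aiops, 'AIOps'), (aiops, 'Security Cloud Control'), (aiops, 'SCC'),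
--         (rtc, 'RTC'), (rtc, 'Rapid Threat Containment'),
--         (sgt, 'SGT'), (sgt, 'Security Group Tags'), (sgt, 'Tag-based Policy'),
--         (hyper, 'Hypershield'), (hyper, 'L4 Segmentation'),
--         (l4 and not smart, 'L4 Switch'), (l4, 'Layer 4'),
--         (mcd, 'MCD'), (mcd, 'Automated Cloud Security Orchestration'),
--         (True, 'Demo Video'),
--     ]
--     return category, [t for f, t in candidates if f]
-- ===== Notes on version B (the rewrite author's own statement) =====
-- stated objective: alternative
-- what changed: B compiles the rule interactions away: the elif chain's exclusivity and the lowercased dedup are replaced by precomputed mutually-exclusive category flags and a fixed candidate list of (condition, tag) pairs, so the output is a single filter with no accumulation, no break, and no dedup pass.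
import Mathlib
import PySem

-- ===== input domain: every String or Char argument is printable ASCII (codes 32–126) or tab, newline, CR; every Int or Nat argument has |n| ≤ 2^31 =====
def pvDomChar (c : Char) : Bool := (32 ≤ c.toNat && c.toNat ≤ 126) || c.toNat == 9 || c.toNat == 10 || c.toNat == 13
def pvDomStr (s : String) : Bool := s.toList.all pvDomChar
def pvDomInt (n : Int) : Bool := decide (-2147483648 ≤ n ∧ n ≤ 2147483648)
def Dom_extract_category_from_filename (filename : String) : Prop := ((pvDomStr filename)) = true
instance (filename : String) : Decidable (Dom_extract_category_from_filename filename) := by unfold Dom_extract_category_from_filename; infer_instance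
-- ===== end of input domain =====

-- B compiles the elif exclusivity and the lowercased dedup into mutually-exclusive flags and
-- per-tag inclusion conditions, so the result is one filter of a fixed candidate list (alternative).

-- A's order-preserving lower-cased dedup loop
def pvDedup (tags : List String) (seen : PySem.Set String) (acc : List String) : List String :=
  match tags with
  | [] => acc
  | t :: ts =>
    if PySem.Set.contains seen (PySem.Str.lower t) then pvDedup ts seen acc
    else pvDedup ts (PySem.Set.add seen (PySem.Str.lower t)) (acc ++ [t])

-- ===== PORT A =====
def extract_category_from_filename (filename : String) : String × List String :=
  let nl := PySem.Str.lower filename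
  let (category, tags) :=
    if PySem.Str.isIn "dc" nl && PySem.Str.isIn "edge" nl then
      ("DC Edge", ["DC Edge", "Data Center Edge", "Edge Security"])
    else if PySem.Str.isIn "cloud" nl && PySem.Str.isIn "edge" nl then
      ("Cloud Edge", ["Cloud Edge", "Cloud Security", "Edge Security"])
    else if PySem.Str.isIn "zone" nl && PySem.Str.isIn "seg" nl then
      ("Zone Segmentation", ["Zone Segmentation", "Segmentation", "Network Segmentation"])
    else if PySem.Str.isIn "macro" nl && PySem.Str.isIn "micro" nl then
      ("Macro/Micro Segmentation", ["Macro Segmentation", "Micro Segmentation", "Segmentation"])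
    else if PySem.Str.isIn "smart" nl && PySem.Str.isIn "switch" nl then
      ("Smart Switch", ["Smart Switch", "L4 Switch", "Switch"])
    else if PySem.Str.isIn "ai" nl && PySem.Str.isIn "model" nl then
      ("AI Model Protection", ["AI Model Protection", "AI Security", "Model Protection"])
    else ("", [])
  let tags := if PySem.Str.isIn "snortml" nl || PySem.Str.isIn "snort" nl then tags ++ ["SnortML", "Zero Day Threat Defense", "Machine Learning"] else tags
  let tags := if PySem.Str.isIn "eve" nl then tags ++ ["EVE", "Encrypted Visibility Engine"] else tags
  let tags := if PySem.Str.isIn "aiops" nl then tags ++ ["AIOps", "Security Cloud Control", "SCC"] else tags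
  let tags := if PySem.Str.isIn "rtc" nl then tags ++ ["RTC", "Rapid Threat Containment"] else tags
  let tags := if PySem.Str.isIn "sgt" nl || PySem.Str.isIn "tag" nl then tags ++ ["SGT", "Security Group Tags", "Tag-based Policy"] else tags
  let tags := if PySem.Str.isIn "hypershield" nl then tags ++ ["Hypershield", "L4 Segmentation"] else tags
  let tags := if PySem.Str.isIn "l4" nl then tags ++ ["L4 Switch", "Layer 4"] else tags
  let tags := if PySem.Str.isIn "mcd" nl then tags ++ ["MCD", "Automated Cloud Security Orchestration"] else tags
  let tags := tags ++ ["Demo Video"]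
  (category, pvDedup tags PySem.Set.empty [])

-- ===== PORT B =====
def extract_category_from_filename_alt (filename : String) : String × List String :=
  let n := PySem.Str.lower filename
  let dc := PySem.Str.isIn "dc" n && PySem.Str.isIn "edge" n
  let cloud := (PySem.Str.isIn "cloud" n && PySem.Str.isIn "edge" n) && !dc
  let zone := (PySem.Str.isIn "zone" n && PySem.Str.isIn "seg" n) && !(dc || cloud)
  let macr := (PySem.Str.isIn "macro" n && PySem.Str.isIn "micro" n) && !(dc || cloud || zone)
  let smart := (PySem.Str.isIn "smart" n && PySem.Str.isIn "switch" n) && !(dc || cloud || zone || macr)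
  let ai := (PySem.Str.isIn "ai" n && PySem.Str.isIn "model" n) && !(dc || cloud || zone || macr || smart)
  let snort := PySem.Str.isIn "snortml" n || PySem.Str.isIn "snort" n
  let eve := PySem.Str.isIn "eve" n
  let aiops := PySem.Str.isIn "aiops" n
  let rtc := PySem.Str.isIn "rtc" n
  let sgt := PySem.Str.isIn "sgt" n || PySem.Str.isIn "tag" n
  let hyper := PySem.Str.isIn "hypershield" n
  let l4 := PySem.Str.isIn "l4" n
  let mcd := PySem.Str.isIn "mcd" n
  let category :=
    (((([(dc, "DC Edge"), (cloud, "Cloud Edge"), (zone, "Zone Segmentation"),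
        (macr, "Macro/Micro Segmentation"), (smart, "Smart Switch"),
        (ai, "AI Model Protection")] : List (Bool × String)).find? (·.1)).map (·.2)).getD "")
  let candidates : List (Bool × String) :=
    [ (dc, "DC Edge"), (dc, "Data Center Edge"), (dc, "Edge Security"),
      (cloud, "Cloud Edge"), (cloud, "Cloud Security"), (cloud, "Edge Security"),
      (zone, "Zone Segmentation"), (zone, "Segmentation"), (zone, "Network Segmentation"),
      (macr, "Macro Segmentation"), (macr, "Micro Segmentation"), (macr, "Segmentation"),
      (smart, "Smart Switch"), (smart, "L4 Switch"), (smart, "Switch"),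
      (ai, "AI Model Protection"), (ai, "AI Security"), (ai, "Model Protection"),
      (snort, "SnortML"), (snort, "Zero Day Threat Defense"), (snort, "Machine Learning"),
      (eve, "EVE"), (eve, "Encrypted Visibility Engine"),
      (aiops, "AIOps"), (aiops, "Security Cloud Control"), (aiops, "SCC"),
      (rtc, "RTC"), (rtc, "Rapid Threat Containment"),
      (sgt, "SGT"), (sgt, "Security Group Tags"), (sgt, "Tag-based Policy"),
      (hyper, "Hypershield"), (hyper, "L4 Segmentation"),
      (l4 && !smart, "L4 Switch"), (l4, "Layer 4"),
      (mcd, "MCD"), (mcd, "Automated Cloud Security Orchestration"),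
      (true, "Demo Video") ]
  (category, (candidates.filter (·.1)).map (·.2))

-- ===== PRECONDITION & SPEC =====
def Spec_extract_category_from_filename (filename : String) (out : String × List String) : Prop := out = extract_category_from_filename_alt filename
instance (filename : String) (out : String × List String) : Decidable (Spec_extract_category_from_filename filename out) := by unfold Spec_extract_category_from_filename; infer_instance

-- ===== CLAIM (what is proved, stated in full; the proofs are below) =====
def Claim_equal_extract_category_from_filename : Prop := ∀ (filename : String), Dom_extract_category_from_filename filename → Spec_extract_category_from_filename filename (extract_category_from_filename filename)

-- ===== LEMMAS AND PROOFS =====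

-- ===== VERDICT (by name: the statement is the Claim_ definition above) =====
set_option maxHeartbeats 2000000 in
theorem extract_category_from_filename_spec : Claim_equal_extract_category_from_filename := by
  intro filename _
  unfold Spec_extract_category_from_filename
  simp only [extract_category_from_filename, extract_category_from_filename_alt]
  generalize (PySem.Str.isIn "dc" (PySem.Str.lower filename) && PySem.Str.isIn "edge" (PySem.Str.lower filename)) = c1
  generalize (PySem.Str.isIn "cloud" (PySem.Str.lower filename) && PySem.Str.isIn "edge" (PySem.Str.lower filename)) = c2
  generalize (PySem.Str.isIn "zone" (PySem.Str.lower filename) && PySem.Str.isIn "seg" (PySem.Str.lower filename)) = c3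
  generalize (PySem.Str.isIn "macro" (PySem.Str.lower filename) && PySem.Str.isIn "micro" (PySem.Str.lower filename)) = c4
  generalize (PySem.Str.isIn "smart" (PySem.Str.lower filename) && PySem.Str.isIn "switch" (PySem.Str.lower filename)) = c5
  generalize (PySem.Str.isIn "ai" (PySem.Str.lower filename) && PySem.Str.isIn "model" (PySem.Str.lower filename)) = c6
  generalize (PySem.Str.isIn "snortml" (PySem.Str.lower filename) || PySem.Str.isIn "snort" (PySem.Str.lower filename)) = p1
  generalize (PySem.Str.isIn "eve" (PySem.Str.lower filename)) = p2
  generalize (PySem.Str.isIn "aiops" (PySem.Str.lower filename)) = p3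
  generalize (PySem.Str.isIn "rtc" (PySem.Str.lower filename)) = p4
  generalize (PySem.Str.isIn "sgt" (PySem.Str.lower filename) || PySem.Str.isIn "tag" (PySem.Str.lower filename)) = p5
  generalize (PySem.Str.isIn "hypershield" (PySem.Str.lower filename)) = p6
  generalize (PySem.Str.isIn "l4" (PySem.Str.lower filename)) = p7
  generalize (PySem.Str.isIn "mcd" (PySem.Str.lower filename)) = p8
  revert p1 p2 p3 p4 p5 p6 p7 p8
  cases c1
  · cases c2
    · cases c3
      · cases c4
        · cases c5
          · cases c6
            · decide
            · simp only [Bool.not_false, Bool.not_true, Bool.and_false, Bool.and_true,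
                Bool.false_and, Bool.true_and, Bool.or_false, Bool.or_true, Bool.false_or,
                Bool.true_or, if_true, if_false]
              decide
          · simp only [Bool.not_false, Bool.not_true, Bool.and_false, Bool.and_true,
              Bool.false_and, Bool.true_and, Bool.or_false, Bool.or_true, Bool.false_or,
              Bool.true_or, if_true, if_false]
            decide
        · simp only [Bool.not_false, Bool.not_true, Bool.and_false, Bool.and_true,
            Bool.false_and, Bool.true_and, Bool.or_false, Bool.or_true, Bool.false_or,
            Bool.true_or, if_true, if_false]
          decide
      · simp only [Bool.not_false, Bool.not_true, Bool.and_false, Bool.and_true,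
          Bool.false_and, Bool.true_and, Bool.or_false, Bool.or_true, Bool.false_or,
          Bool.true_or, if_true, if_false]
        decide
    · simp only [Bool.not_false, Bool.not_true, Bool.and_false, Bool.and_true,
        Bool.false_and, Bool.true_and, Bool.or_false, Bool.or_true, Bool.false_or,
        Bool.true_or, if_true, if_false]
      decide
  · simp only [Bool.not_false, Bool.not_true, Bool.and_false, Bool.and_true,
      Bool.false_and, Bool.true_and, Bool.or_false, Bool.or_true, Bool.false_or,
      Bool.true_or, if_true, if_false]
    decide
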